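-- pv_equiv track=rewrite | github.com/quantmew/ripperdoc | ripperdoc/utils/filesystem/git_utils.py | _parse_gitignore_line
-- ===== SOURCE A (Python) =====
-- from typing import Dict, Iterable, List, Optional, Tuple, Union
--
-- def _parse_gitignore_line(raw_line: str) -> Optional[Tuple[str, bool]]:
--     line = raw_line.strip()
--     if not line:
--         return None
--
--     negation = False
--     parsed: List[str] = []
--     i = 0
--     while i < len(line):
--         c = line[i]
--         if c == "\\" and i + 1 < len(line):
--             i += 1
--             parsed.append(line[i])
--             i += 1
--             continue
--         if i == 0 and c == "#":
--             return None
--         if i == 0 and c == "!":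
--             negation = True
--             i += 1
--             continue
--         parsed.append(c)
--         i += 1
--
--     pattern = "".join(parsed).strip()
--     if not pattern:
--         return None
--     return pattern, negation
-- ===== SOURCE B (Python) =====
-- def _parse_gitignore_line(raw_line):
--     line = raw_line.strip()
--     if not line:
--         return None
--     if line[0] == '#':
--         return None
--     negation = line[0] == '!'
--     if negation:
--         line = line[1:]
--     # unescape by splitting on backslash and reassembling chunks:
--     # a nonempty piece is literal text; an empty piece means the separator
--     # backslash escaped the following backslash (its piece is glued on),
--     # and a trailing empty piece is a lone trailing backslash, kept as-is.
--     parts = line.split('\\')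
--     chunks = [parts[0]]
--     i = 1
--     while i < len(parts):
--         p = parts[i]
--         if p:
--             chunks.append(p)
--             i += 1
--         elif i + 1 < len(parts):
--             chunks.append('\\' + parts[i + 1])
--             i += 2
--         else:
--             chunks.append('\\')
--             i += 1
--     pattern = ''.join(chunks).strip()
--     if not pattern:
--         return None
--     return pattern, negation
-- ===== Notes on version B (the rewrite author's own statement) =====
-- stated objective: faster
-- what changed: A's per-character index loop (escape handling, i==0 marker tests, per-char append) is replaced by marker checks on the first character followed by str.split('\\') and a chunk-reassembly pass over the resulting pieces (nonempty piece = literal text, empty piece = an escaped backslash gluing the next piece, trailing empty piece = a kept lone backslash).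
import Mathlib
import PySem

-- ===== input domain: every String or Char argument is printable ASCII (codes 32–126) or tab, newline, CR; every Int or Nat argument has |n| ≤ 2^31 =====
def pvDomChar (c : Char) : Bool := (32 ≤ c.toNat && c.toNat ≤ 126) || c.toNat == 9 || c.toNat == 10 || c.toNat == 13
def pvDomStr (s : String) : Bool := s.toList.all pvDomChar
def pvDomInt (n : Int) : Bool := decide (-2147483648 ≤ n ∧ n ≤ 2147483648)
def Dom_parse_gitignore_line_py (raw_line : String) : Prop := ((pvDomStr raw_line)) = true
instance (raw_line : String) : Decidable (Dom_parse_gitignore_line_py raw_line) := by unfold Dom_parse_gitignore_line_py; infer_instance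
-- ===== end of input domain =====

-- B replaces A's per-character index loop by marker checks on the first character followed
-- by split('\') and a chunk-reassembly pass over the pieces; objective: faster (measured; C-level split vs per-char loop).

-- ===== PORT A =====
-- A's while-loop: index i over the stripped line, escape handling first, '#'/'!' only at i = 0.
def pvALoop (cs : List Char) (i : Nat) (negation : Bool) (parsed : List Char) :
    Option (List Char × Bool) :=
  if h : i < cs.length then
    let c := cs[i]
    if h2 : c = '\\' ∧ i + 1 < cs.length then
      pvALoop cs (i + 2) negation (parsed ++ [cs[i + 1]'h2.2])
    else if i = 0 ∧ c = '#' then none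
    else if i = 0 ∧ c = '!' then pvALoop cs (i + 1) true parsed
    else pvALoop cs (i + 1) negation (parsed ++ [c])
  else some (parsed, negation)
termination_by cs.length - i

def parse_gitignore_line_py (raw_line : String) : Option (String × Bool) :=
  let line0 := PySem.Str.strip raw_line
  if line0 = "" then none
  else
    match pvALoop line0.toList 0 false [] with
    | none => none
    | some (parsed, negation) =>
      let pattern := PySem.Str.strip (String.ofList parsed)
      if pattern = "" then none else some (pattern, negation)

-- ===== PORT B =====
-- B's chunk loop over the pieces of line.split('\'): a nonempty piece is literal text, an
-- empty piece glues a backslash onto the next piece, a trailing empty piece is a lone backslash.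
def pvChunks : List (List Char) → List (List Char)
  | [] => []
  | p :: rest =>
    if p ≠ [] then p :: pvChunks rest
    else
      match rest with
      | q :: rest' => ('\\' :: q) :: pvChunks rest'
      | [] => [['\\']]

def parse_gitignore_line_py_alt (raw_line : String) : Option (String × Bool) :=
  let line0 := PySem.Str.strip raw_line
  if line0 = "" then none
  else
    match line0.toList with
    | [] => none
    | c :: restAll =>
      if c = '#' then none
      else
        let negation := c = '!'
        let body := if negation then restAll else c :: restAll
        match PySem.Chars.splitOn body ['\\'] with
        | [] => none  -- unreachable (split never returns an empty list); totality guard only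
        | p :: ps =>
          let pattern :=
            PySem.Str.strip (String.ofList (PySem.Chars.join [] (p :: pvChunks ps)))
          if pattern = "" then none else some (pattern, negation)

-- ===== PRECONDITION & SPEC =====
def Spec_parse_gitignore_line_py (raw_line : String) (out : Option (String × Bool)) : Prop := out = parse_gitignore_line_py_alt raw_line
instance (raw_line : String) (out : Option (String × Bool)) : Decidable (Spec_parse_gitignore_line_py raw_line out) := by unfold Spec_parse_gitignore_line_py; infer_instance

-- ===== CLAIM (what is proved, stated in full; the proofs are below) =====
def Claim_equal_parse_gitignore_line_py : Prop := ∀ (raw_line : String), Dom_parse_gitignore_line_py raw_line → Spec_parse_gitignore_line_py raw_line (parse_gitignore_line_py raw_line)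

-- ===== LEMMAS AND PROOFS =====

-- the common unescape semantics both programs realise: "\x" -> "x", lone trailing backslash stays
def pvUnescape : List Char → List Char
  | [] => []
  | [c] => [c]
  | c :: d :: rest => if c = '\\' then d :: pvUnescape rest else c :: pvUnescape (d :: rest)

theorem pvUnescape_cons_ne (c : Char) (rest : List Char)
    (h : c ≠ '\\' ∨ rest = []) : pvUnescape (c :: rest) = c :: pvUnescape rest := by
  cases rest with
  | nil => rfl
  | cons d r =>
    rcases h with h | h
    · simp [pvUnescape, h]
    · exact absurd h (by simp)

-- for i ≥ 1 the loop never re-enters the i = 0 branches: it is the unescape of the tail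
theorem pvALoop_eq (cs : List Char) (i : Nat) (hi : 1 ≤ i) (neg : Bool) (parsed : List Char) :
    pvALoop cs i neg parsed = some (parsed ++ pvUnescape (cs.drop i), neg) := by
  by_cases h : i < cs.length
  · have hdrop : cs.drop i = cs[i] :: cs.drop (i + 1) :=
      (List.getElem_cons_drop h).symm
    rw [pvALoop]
    simp only [dif_pos h]
    by_cases hesc : cs[i] = '\\' ∧ i + 1 < cs.length
    · rw [dif_pos hesc]
      have h2 : cs.drop (i + 1) = cs[i + 1]'(hesc.2) :: cs.drop (i + 2) :=
        (List.getElem_cons_drop hesc.2).symm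
      rw [pvALoop_eq cs (i + 2) (by omega) neg _]
      rw [hdrop, h2]
      have hcc : cs[i] = '\\' := hesc.1
      simp [pvUnescape, hcc]
    · rw [dif_neg hesc, if_neg (by omega : ¬ (i = 0 ∧ cs[i] = '#')),
        if_neg (by omega : ¬ (i = 0 ∧ cs[i] = '!'))]
      rw [pvALoop_eq cs (i + 1) (by omega) neg _]
      rw [hdrop]
      have hu : pvUnescape (cs[i] :: cs.drop (i + 1))
          = cs[i] :: pvUnescape (cs.drop (i + 1)) := by
        apply pvUnescape_cons_ne
        by_cases hb : cs[i] = '\\'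
        · right
          have : ¬ i + 1 < cs.length := fun hlt => hesc ⟨hb, hlt⟩
          simp [List.drop_eq_nil_iff]; omega
        · left; exact hb
      rw [hu]
      simp
  · rw [pvALoop]
    simp only [dif_neg h]
    have hd : cs.drop i = [] := by simp [List.drop_eq_nil_iff]; omega
    rw [hd]
    simp [pvUnescape]
termination_by cs.length - i

-- the first iteration of A's loop, case by case on the head character
theorem pvALoop_zero (c : Char) (rest : List Char) (hc : c ≠ '#') :
    pvALoop (c :: rest) 0 false [] =
      some (pvUnescape (if c = '!' then rest else c :: rest), decide (c = '!')) := by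
  rw [pvALoop]
  have hlen : 0 < (c :: rest).length := by simp
  rw [dif_pos hlen]
  have hget : (c :: rest)[0] = c := rfl
  by_cases hesc : (c :: rest)[0] = '\\' ∧ 0 + 1 < (c :: rest).length
  · rw [dif_pos hesc]
    obtain ⟨d, r, rfl⟩ : ∃ d r, rest = d :: r := by
      cases rest with
      | nil => simp at hesc
      | cons d r => exact ⟨d, r, rfl⟩
    have hc' : c = '\\' := by simpa using hesc.1
    subst hc'
    rw [pvALoop_eq _ 2 (by omega) false _]
    simp [pvUnescape]
  · rw [dif_neg hesc, if_neg (by simp [hget, hc] : ¬ (0 = 0 ∧ (c :: rest)[0] = '#'))]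
    by_cases hbang : c = '!'
    · rw [if_pos (by simp [hget, hbang] : (0 = 0 ∧ (c :: rest)[0] = '!'))]
      rw [pvALoop_eq _ 1 (by omega) true _]
      simp [hbang]
    · rw [if_neg (by simp [hget, hbang] : ¬ (0 = 0 ∧ (c :: rest)[0] = '!'))]
      rw [pvALoop_eq _ 1 (by omega) false _]
      have hu : pvUnescape (c :: rest) = c :: pvUnescape rest := by
        apply pvUnescape_cons_ne
        by_cases hb : c = '\\'
        · cases rest with
          | nil => right; rfl
          | cons d r => exact absurd ⟨by simp [hb], by simp⟩ hesc
        · left; exact hb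
      simp [hbang, hu]

-- ---- B side: characterise splitOn ['\\'] by a simple recursion, then tie to pvUnescape ----

def pvConsHead (p : List Char) : List (List Char) → List (List Char)
  | [] => [p]
  | q :: qs => (p ++ q) :: qs

def pvSplit : List Char → List (List Char)
  | [] => [[]]
  | c :: rest => if c = '\\' then [] :: pvSplit rest else pvConsHead [c] (pvSplit rest)

theorem pvSplit_ne_nil (cs : List Char) : pvSplit cs ≠ [] := by
  cases cs with
  | nil => simp [pvSplit]
  | cons c rest =>
    simp only [pvSplit]
    split_ifs
    · simp
    · cases h : pvSplit rest <;> simp [pvConsHead]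

theorem pvConsHead_consHead (a b : List Char) (ps : List (List Char)) :
    pvConsHead a (pvConsHead b ps) = pvConsHead (a ++ b) ps := by
  cases ps <;> simp [pvConsHead]

theorem pvConsHead_nil_of_ne (ps : List (List Char)) (h : ps ≠ []) :
    pvConsHead [] ps = ps := by
  cases ps with
  | nil => exact absurd rfl h
  | cons q qs => simp [pvConsHead]

theorem splitOn_go_spec (fuel : Nat) (l cur : List Char) (acc : List (List Char))
    (hf : l.length ≤ fuel) :
    PySem.Chars.splitOn.go ['\\'] fuel l cur acc
      = acc.reverse ++ pvConsHead cur.reverse (pvSplit l) := by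
  induction fuel generalizing l cur acc with
  | zero =>
    have : l = [] := List.length_eq_zero_iff.mp (Nat.le_zero.mp hf)
    subst this
    simp [PySem.Chars.splitOn.go, pvSplit, pvConsHead]
  | succ fuel ih =>
    cases l with
    | nil => simp [PySem.Chars.splitOn.go, pvSplit, pvConsHead]
    | cons c rest =>
      rw [PySem.Chars.splitOn.go]
      by_cases hc : c = '\\'
      · have hp : List.isPrefixOf ['\\'] (c :: rest) = true := by
          simp [List.isPrefixOf, hc]
        rw [if_pos hp]
        have : List.drop (['\\'] : List Char).length (c :: rest) = rest := by simp
        rw [this, ih rest [] (cur.reverse :: acc) (by simpa using Nat.le_of_succ_le_succ hf)]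
        simp only [List.reverse_nil]
        rw [pvConsHead_nil_of_ne _ (pvSplit_ne_nil rest)]
        cases hps : pvSplit rest with
        | nil => exact absurd hps (pvSplit_ne_nil rest)
        | cons q qs =>
          simp [pvSplit, hc, hps, pvConsHead]
      · have hp : List.isPrefixOf ['\\'] (c :: rest) = false := by
          simp [List.isPrefixOf]; exact fun h => absurd h.symm hc
        rw [if_neg (by simp [hp])]
        rw [ih rest (c :: cur) acc (by simpa using Nat.le_of_succ_le_succ hf)]
        simp only [pvSplit, if_neg hc]
        rw [pvConsHead_consHead]
        simp

theorem splitOn_eq_pvSplit (cs : List Char) :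
    PySem.Chars.splitOn cs ['\\'] = pvSplit cs := by
  rw [PySem.Chars.splitOn, splitOn_go_spec cs.length.succ cs [] [] (Nat.le_succ _)]
  simp [pvConsHead_nil_of_ne _ (pvSplit_ne_nil cs)]

theorem pvJoin_nil (ps : List (List Char)) : PySem.Chars.join [] ps = ps.flatten := by
  induction ps with
  | nil => rfl
  | cons p ps ih =>
    cases ps with
    | nil => simp [PySem.Chars.join, List.intercalate, List.intersperse]
    | cons q qs =>
      simp only [PySem.Chars.join, List.intercalate, List.intersperse] at *
      simp [ih]

-- the reassembled chunks of the split ARE the unescape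
theorem pvChunks_cons_ne (q : List Char) (qs : List (List Char)) (h : q ≠ []) :
    pvChunks (q :: qs) = q :: pvChunks qs := by
  cases q with
  | nil => exact absurd rfl h
  | cons a as => cases qs <;> simp [pvChunks]

theorem pvSplit_unescape (cs : List Char) :
    ∀ p ps, pvSplit cs = p :: ps → p ++ (pvChunks ps).flatten = pvUnescape cs := by
  match cs with
  | [] =>
    intro p ps h
    rw [pvSplit] at h
    injection h with h1 h2
    subst h1; subst h2
    rfl
  | [c] =>
    intro p ps h
    by_cases hc : c = '\\'
    · subst hc
      have hsp : pvSplit ['\\'] = [[], []] := by simp [pvSplit]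
      rw [hsp] at h
      injection h with h1 h2
      subst h1; subst h2
      rfl
    · have hsp : pvSplit [c] = [[c]] := by simp [pvSplit, hc, pvConsHead]
      rw [hsp] at h
      injection h with h1 h2
      subst h1; subst h2
      simp [pvChunks, pvUnescape]
  | c :: d :: rest =>
    intro p ps h
    by_cases hc : c = '\\'
    · subst hc
      rw [pvSplit, if_pos rfl] at h
      injection h with h1 h2
      subst h1; subst h2
      by_cases hd : d = '\\'
      · subst hd
        cases hq : pvSplit rest with
        | nil => exact absurd hq (pvSplit_ne_nil rest)
        | cons q qs =>
          have hih := pvSplit_unescape rest q qs hq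
          rw [pvSplit, if_pos rfl, hq]
          rw [show pvChunks ([] :: q :: qs) = ('\\' :: q) :: pvChunks qs from by
            simp [pvChunks]]
          simpa [pvUnescape] using congrArg (List.cons '\\') hih
      · cases hq : pvSplit rest with
        | nil => exact absurd hq (pvSplit_ne_nil rest)
        | cons q qs =>
          have hih := pvSplit_unescape rest q qs hq
          rw [pvSplit, if_neg hd, hq]
          rw [show pvConsHead [d] (q :: qs) = (d :: q) :: qs from rfl]
          rw [pvChunks_cons_ne _ _ (by simp)]
          have hend : pvUnescape ('\\' :: d :: rest) = d :: pvUnescape rest := by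
            simp [pvUnescape]
          rw [hend]
          simpa using congrArg (List.cons d) hih
    · cases hq : pvSplit (d :: rest) with
      | nil => exact absurd hq (pvSplit_ne_nil (d :: rest))
      | cons q qs =>
        have hih := pvSplit_unescape (d :: rest) q qs hq
        rw [pvSplit, if_neg hc, hq, show pvConsHead [c] (q :: qs) = (c :: q) :: qs from rfl] at h
        injection h with h1 h2
        subst h1; subst h2
        rw [pvUnescape_cons_ne c (d :: rest) (Or.inl hc)]
        simpa using congrArg (List.cons c) hih

-- ===== VERDICT (by name: the statement is the Claim_ definition above) =====
theorem parse_gitignore_line_py_spec : Claim_equal_parse_gitignore_line_py := by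
  intro raw_line _
  unfold Spec_parse_gitignore_line_py parse_gitignore_line_py parse_gitignore_line_py_alt
  set cs := PySem.Str.strip raw_line with hcs
  by_cases hempty : cs = ""
  · simp [hempty]
  · simp only [if_neg hempty]
    cases hl : cs.toList with
    | nil =>
      exact absurd (String.toList_inj.mp (by rw [hl]; rfl)) hempty
    | cons c rest =>
      by_cases hc : c = '#'
      · subst hc
        have hnone : pvALoop ('#' :: rest) 0 false [] = none := by
          rw [pvALoop]; simp
        simp [hnone]
      · rw [pvALoop_zero c rest hc]
        dsimp only
        rw [if_neg hc]
        set body := if c = '!' then rest else c :: rest with hbody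
        cases hq : pvSplit body with
        | nil => exact absurd hq (pvSplit_ne_nil body)
        | cons p ps =>
          rw [splitOn_eq_pvSplit, hq]
          have hmain := pvSplit_unescape body p ps hq
          dsimp only
          rw [pvJoin_nil, List.flatten_cons, hmain]
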